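-- pv_equiv track=rewrite | github.com/jordicido/AoC2015Py | day8.py | part1
-- ===== SOURCE A (Python) =====
-- def part1(input):
--     total = 0
--     characters_in_mem = 0
--     for element in input:
--         total += len(element)
--         chars_without_quotes = element[1:-1]
--         i = 0
--
--         while i < len(chars_without_quotes):
--             if chars_without_quotes[i] == "\\":
--                 if chars_without_quotes[i+1] == "\\" or chars_without_quotes[i+1] == "\"":
--                     i += 1
--                 elif chars_without_quotes[i+1] == "x":
--                     i += 3
--             characters_in_mem += 1
--             i += 1
--
--
--     return total - characters_in_mem
-- ===== SOURCE B (Python) =====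
-- import re
--
-- # One regex-driven pass: tokenize the quote-stripped body into escape tokens and
-- # count tokens; [\s\S] stands for "any char" (newlines included), and \x[\s\S]{0,2}
-- # greedily takes up to two chars so a truncated trailing \x is still one token.
-- _TOKEN = re.compile(r'\\\\|\\"|\\x[\s\S]{0,2}|[\s\S]')
--
-- def part1(input):
--     total = sum(len(e) for e in input)
--     mem = sum(len(_TOKEN.findall(e[1:-1])) for e in input)
--     return total - mem
-- ===== Notes on version B (the rewrite author's own statement) =====
-- stated objective: idiomatic
-- what changed: Replaces A's stateful index-arithmetic while loop (manual i += skips with two running counters threaded across elements) by two sums and a regex tokenization: mem is the number of matches of \\\\|\\"|\\x[\s\S]{0,2}|[\s\S] in each quote-stripped body, delegating all cursor advancement to the regex engine.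
import Mathlib
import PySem

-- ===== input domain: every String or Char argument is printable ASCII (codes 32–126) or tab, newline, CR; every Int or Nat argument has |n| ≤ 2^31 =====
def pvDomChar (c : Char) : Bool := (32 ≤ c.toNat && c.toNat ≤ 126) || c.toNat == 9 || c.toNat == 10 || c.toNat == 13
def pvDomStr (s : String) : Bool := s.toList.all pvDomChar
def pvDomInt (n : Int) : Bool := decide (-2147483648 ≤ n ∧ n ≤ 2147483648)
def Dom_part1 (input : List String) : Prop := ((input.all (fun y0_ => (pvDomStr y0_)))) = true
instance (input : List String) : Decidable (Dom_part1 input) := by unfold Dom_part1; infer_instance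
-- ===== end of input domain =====

set_option maxRecDepth 4000


-- B replaces A's index-arithmetic while loop by two sums and a regex tokenization (idiomatic, same cost).

-- ===== PORT A =====
-- A's inner while loop over chars_without_quotes: i is the index, mem the running
-- characters_in_mem.  chars_without_quotes[i+1] is read via pyGet?; where Python would
-- raise IndexError (none), we return the current mem (those inputs are outside Pre_part1).
def part1Loop (s : List Char) (i : Nat) (mem : Int) : Int :=
  if h : i < s.length then
    if s[i] = '\\' then
      match PySem.List.pyGet? s ((i : Int) + 1) with
      | some n =>
        if n = '\\' || n = '"' then part1Loop s (i + 1 + 1) (mem + 1)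
        else if n = 'x' then part1Loop s (i + 3 + 1) (mem + 1)
        else part1Loop s (i + 1) (mem + 1)
      | none => mem   -- Python raises IndexError here; excluded by Pre_part1
    else part1Loop s (i + 1) (mem + 1)
  else mem
termination_by s.length - i

-- element[1:-1] on a string = the same slice of its char list (exact)
def part1 (input : List String) : Int :=
  let st := input.foldl
    (fun acc element =>
      let total := acc.1 + (element.toList.length : Int)
      let chars_without_quotes := PySem.List.slice element.toList (some 1) (some (-1))
      (total, part1Loop chars_without_quotes 0 acc.2))
    (0, 0)
  st.1 - st.2

-- ===== PORT B =====
-- hand port of Source B's regex findall count for the pattern  \\\\|\\"|\\x[\s\S]{0,2}|[\s\S]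
-- (re has no PySem primitive): leftmost greedy tokenization, alternatives tried in the
-- pattern's order — '\\''\\' and '\\''"' are 2-char tokens, '\\''x' takes up to two more
-- chars ([\s\S]{0,2} greedy = drop 2, exact also near the end of the list), and any
-- single char otherwise ([\s\S]) — returning the number of matches; exact on all inputs.
def tokCount : List Char → Int
  | [] => 0
  | c :: r =>
    if c = '\\' then
      match r with
      | n :: r' =>
        if n = '\\' || n = '"' then 1 + tokCount r'      -- token \\ or \"
        else if n = 'x' then
          match r' with
          | _ :: _ :: r'' => 1 + tokCount r''            -- token \x?? ([\s\S]{0,2} took 2)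
          | [_] => 1                                     -- … took 1 (end of body)
          | [] => 1                                      -- … took 0 (end of body)
        else 2 + tokCount r'                             -- '\' matched by [\s\S], and n (≠ '\')
                                                         -- necessarily by the next [\s\S] token: two tokens
      | [] => 1                                          -- lone final '\' matched by [\s\S]
    else 1 + tokCount r                                  -- ordinary char, one token

-- total = sum of len(e); mem = sum of token counts of e[1:-1]; result total - mem
def part1_alt (input : List String) : Int :=
  (input.foldl (fun t element => t + (element.toList.length : Int)) 0)
    - (input.foldl
        (fun m element =>
          m + tokCount (PySem.List.slice element.toList (some 1) (some (-1)))) 0)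

-- ===== PRECONDITION & SPEC =====
-- Shape condition: membership in the regular language "ends in a dangling backslash",
-- decided by the 4-state automaton of the escape syntax (state 0 = token boundary,
-- 1 = just after a '\', 2/3 = inside the two chars following \x); no counters, no
-- accumulators, nothing of either port's computation.  A string is dangling iff the
-- automaton ends in state 1, i.e. a final lone '\' with nothing after it to read.
def escStep (q : Nat) (c : Char) : Nat :=
  if q = 1 then (if c = 'x' then 2 else 0)
  else if q = 2 then 3
  else if q = 3 then 0
  else if c = '\\' then 1 else 0

def dangling (l : List Char) : Bool := l.foldl escStep 0 == 1

-- Pre_ excludes exactly the inputs on which A raises IndexError (a dangling final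
-- backslash in some element's quote-stripped body); nothing A returns on is excluded.
def Pre_part1 (input : List String) : Prop :=
  ∀ element ∈ input,
    dangling (PySem.List.slice element.toList (some 1) (some (-1))) = false
instance (input : List String) : Decidable (Pre_part1 input) := by
  unfold Pre_part1; infer_instance

def pvWitness_part1 : List String := ["\"a\\\\b\""]

def Spec_part1 (input : List String) (out : Int) : Prop := out = part1_alt input
instance (input : List String) (out : Int) : Decidable (Spec_part1 input out) := by unfold Spec_part1; infer_instance

-- ===== CLAIM (what is proved, stated in full; the proofs are below) =====
def Claim_equal_part1 : Prop := ∀ (input : List String), Dom_part1 input → Pre_part1 input → Spec_part1 input (part1 input)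

-- ===== LEMMAS AND PROOFS =====

lemma tokCount_nil : tokCount [] = 0 := rfl

lemma tokCount_other {c : Char} (h : c ≠ '\\') (l : List Char) :
    tokCount (c :: l) = 1 + tokCount l := by
  rw [tokCount.eq_def]; simp [h]

lemma tokCount_bs_bs (l : List Char) : tokCount ('\\' :: '\\' :: l) = 1 + tokCount l := by
  rw [tokCount.eq_def]; simp

lemma tokCount_bs_quote (l : List Char) : tokCount ('\\' :: '"' :: l) = 1 + tokCount l := by
  rw [tokCount.eq_def]; simp

lemma tokCount_bs_x (l : List Char) : tokCount ('\\' :: 'x' :: l) = 1 + tokCount (l.drop 2) := by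
  rcases l with _ | ⟨a, _ | ⟨b, t⟩⟩ <;> simp [tokCount, tokCount_nil]

lemma tokCount_bs_other {n : Char} (h1 : n ≠ '\\') (h2 : n ≠ '"') (h3 : n ≠ 'x')
    (l : List Char) : tokCount ('\\' :: n :: l) = 2 + tokCount l := by
  rw [tokCount.eq_def]; simp [h1, h2, h3]

lemma dangling_other {c : Char} (h : c ≠ '\\') (l : List Char) :
    dangling (c :: l) = dangling l := by
  simp [dangling, escStep, h]

lemma dangling_bs_bs (l : List Char) : dangling ('\\' :: '\\' :: l) = dangling l := by
  simp [dangling, escStep]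

lemma dangling_bs_quote (l : List Char) : dangling ('\\' :: '"' :: l) = dangling l := by
  simp [dangling, escStep]

lemma dangling_bs_x (l : List Char) : dangling ('\\' :: 'x' :: l) = dangling (l.drop 2) := by
  rcases l with _ | ⟨a, _ | ⟨b, t⟩⟩ <;> simp [dangling, escStep]

lemma dangling_bs_other {n : Char} (_h1 : n ≠ '\\') (_h2 : n ≠ '"') (h3 : n ≠ 'x')
    (l : List Char) : dangling ('\\' :: n :: l) = dangling l := by
  simp [dangling, escStep, h3]

lemma dangling_bs_nil : dangling ['\\'] = true := rfl

lemma part1Loop_eq_tokCount (s : List Char) :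
    ∀ i mem, dangling (s.drop i) = false → part1Loop s i mem = mem + tokCount (s.drop i) := by
  suffices h : ∀ k i mem, s.length - i ≤ k → dangling (s.drop i) = false →
      part1Loop s i mem = mem + tokCount (s.drop i) from
    fun i mem hd => h s.length i mem (by omega) hd
  intro k
  induction k with
  | zero =>
    intro i mem hk _
    unfold part1Loop
    rw [dif_neg (by omega)]
    rw [List.drop_eq_nil_of_le (by omega), tokCount_nil]
    ring
  | succ k ih =>
    intro i mem hk hd
    by_cases hi : i < s.length
    · have hdrop : List.drop i s = s[i] :: List.drop (i + 1) s := by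
        rw [List.getElem_cons_drop]
      unfold part1Loop
      rw [dif_pos hi]
      by_cases hc : s[i] = '\\'
      · rw [if_pos hc]
        by_cases hi1 : i + 1 < s.length
        · have hget : PySem.List.pyGet? s ((i : Int) + 1) = some s[i + 1] := by
            have hcast : ((i : Int) + 1) = ((i + 1 : Nat) : Int) := by push_cast; ring
            rw [hcast, PySem.List.pyGet?_natCast, List.getElem?_eq_getElem hi1]
          have hdrop1 : List.drop (i + 1) s = s[i + 1] :: List.drop (i + 2) s := by
            rw [show i + 2 = (i + 1) + 1 from rfl, List.getElem_cons_drop]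
          simp only [hget]
          by_cases ha : s[i + 1] = '\\'
          · rw [if_pos (show (decide (s[i + 1] = '\\') || decide (s[i + 1] = '"')) = true by
              simp [ha])]
            have hd2 : dangling (List.drop (i + 2) s) = false := by
              rw [hdrop, hdrop1, hc, ha, dangling_bs_bs] at hd; exact hd
            rw [ih (i + 1 + 1) (mem + 1) (by omega) (by rwa [show i + 1 + 1 = i + 2 from rfl]),
                show i + 1 + 1 = i + 2 from rfl, hdrop, hdrop1, hc, ha, tokCount_bs_bs]
            ring
          · by_cases hb : s[i + 1] = '"'
            · rw [if_pos (show (decide (s[i + 1] = '\\') || decide (s[i + 1] = '"')) = true by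
                simp [hb])]
              have hd2 : dangling (List.drop (i + 2) s) = false := by
                rw [hdrop, hdrop1, hc, hb, dangling_bs_quote] at hd; exact hd
              rw [ih (i + 1 + 1) (mem + 1) (by omega) (by rwa [show i + 1 + 1 = i + 2 from rfl]),
                  show i + 1 + 1 = i + 2 from rfl, hdrop, hdrop1, hc, hb, tokCount_bs_quote]
              ring
            · rw [if_neg (show ¬ (decide (s[i + 1] = '\\') || decide (s[i + 1] = '"')) = true by
                simp [ha, hb])]
              by_cases hx : s[i + 1] = 'x'
              · rw [if_pos hx]
                have hdd : List.drop 2 (List.drop (i + 2) s) = List.drop (i + 4) s := by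
                  rw [List.drop_drop]
                have hd2 : dangling (List.drop (i + 4) s) = false := by
                  rw [hdrop, hdrop1, hc, hx, dangling_bs_x, hdd] at hd; exact hd
                rw [ih (i + 3 + 1) (mem + 1) (by omega) (by rwa [show i + 3 + 1 = i + 4 from by omega]),
                    show i + 3 + 1 = i + 4 from by omega, hdrop, hdrop1, hc, hx, tokCount_bs_x, hdd]
                ring
              · rw [if_neg hx]
                have hd3 : dangling (List.drop (i + 2) s) = false := by
                  rw [hdrop, hdrop1, hc, dangling_bs_other ha hb hx] at hd; exact hd
                have hd2 : dangling (List.drop (i + 1) s) = false := by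
                  rw [hdrop1, dangling_other ha]; exact hd3
                rw [ih (i + 1) (mem + 1) (by omega) hd2, hdrop, hdrop1, hc,
                    tokCount_bs_other ha hb hx, tokCount_other ha]
                ring
        · -- i is the last index and s[i] = '\\': dangling, contradicting hd
          exfalso
          have hnil : List.drop (i + 1) s = [] := List.drop_eq_nil_of_le (by omega)
          rw [hdrop, hnil, hc, dangling_bs_nil] at hd
          simp at hd
      · rw [if_neg hc]
        have hd2 : dangling (List.drop (i + 1) s) = false := by
          rw [hdrop, dangling_other hc] at hd; exact hd
        rw [ih (i + 1) (mem + 1) (by omega) hd2, hdrop, tokCount_other hc]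
        ring
    · unfold part1Loop
      rw [dif_neg hi]
      rw [List.drop_eq_nil_of_le (by omega), tokCount_nil]
      ring
-- fold invariant: A's paired fold equals B's two separate folds, componentwise
lemma fold_eq :
    ∀ (l : List String),
      (∀ e ∈ l, dangling (PySem.List.slice e.toList (some 1) (some (-1))) = false) →
      ∀ (t m : Int),
      (l.foldl (fun acc element =>
          (acc.1 + (element.toList.length : Int),
           part1Loop (PySem.List.slice element.toList (some 1) (some (-1))) 0 acc.2)) (t, m))
      = (l.foldl (fun t element => t + (element.toList.length : Int)) t,
         l.foldl (fun m element =>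
           m + tokCount (PySem.List.slice element.toList (some 1) (some (-1)))) m) := by
  intro l
  induction l with
  | nil => intro _ t m; simp
  | cons e l ihl =>
    intro hl t m
    simp only [List.foldl_cons]
    rw [part1Loop_eq_tokCount _ 0 m (by simpa using hl e List.mem_cons_self), List.drop_zero]
    exact ihl (fun x hx => hl x (List.mem_cons_of_mem _ hx)) _ _

-- ===== VERDICT (by name: the statement is the Claim_ definition above) =====
theorem part1_spec : Claim_equal_part1 := by
  intro input hdom hpre
  show part1 input = part1_alt input
  unfold part1 part1_alt
  rw [fold_eq input hpre 0 0]
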